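-- pv_equiv track=rewrite | github.com/sleepyyapril/TheDen | Tools/reuse_utilities/reuse_helperfunctions.py | process_author_list
-- ===== SOURCE A (Python) =====
-- IGNORED_AUTHORS = {
--     "PJBot",
--     "github-actions[bot]",
--     "GoobBot",
--     "GoobBot[bot]",
--     "GoobBot [bot]",
--     "TheDen-Bot",
-- }
--
-- def process_author_list(raw_authors):
--     """
--     takes the output from get_authors_from_git or parse_existing_header and returns a list of strings where each string is "yyyy author"
--     this function is to be used on the final list of authors, right before feeding it to create_header
--     :param raw_authors: the authors, structured like get_authors_from_file
--     :return: the list of authors, sorted and properly formatted, as a list of strings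
--     """
--     authors_list: [str] = []
--     seen_authors_set = set()
--     for author_date, author_name in raw_authors:
--         if author_name in seen_authors_set:
--             continue
--         if author_name in IGNORED_AUTHORS:
--             continue
--         if not author_name:
--             continue
--         if not author_date:
--             continue
--
--         seen_authors_set.add(author_name)
--         authors_list.append(f"{author_date} {author_name}")
--
--     authors_list.sort()
--     return authors_list
-- ===== SOURCE B (Python) =====
-- IGNORED_AUTHORS = {
--     "PJBot",
--     "github-actions[bot]",
--     "GoobBot",
--     "GoobBot[bot]",
--     "GoobBot [bot]",
--     "TheDen-Bot",
-- }
--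
-- def process_author_list(raw_authors):
--     # Walk the list back-to-front and unconditionally overwrite: the last write
--     # (= first valid occurrence in the original order) wins, so no seen-set or
--     # membership test is needed at all.
--     latest = {}
--     for author_date, author_name in reversed(raw_authors):
--         if author_name and author_date and author_name not in IGNORED_AUTHORS:
--             latest[author_name] = author_date
--     return sorted(f"{date} {name}" for name, date in latest.items())
-- ===== Notes on version B (the rewrite author's own statement) =====
-- stated objective: alternative
-- what changed: Instead of A's forward pass with a seen-set guard and incremental result list, B walks the list in reverse and unconditionally overwrites a name-to-date dict (so the last write, i.e. the first valid occurrence in original order, wins, eliminating the dedup membership test), then formats and sorts in a separate pass.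
import Mathlib
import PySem

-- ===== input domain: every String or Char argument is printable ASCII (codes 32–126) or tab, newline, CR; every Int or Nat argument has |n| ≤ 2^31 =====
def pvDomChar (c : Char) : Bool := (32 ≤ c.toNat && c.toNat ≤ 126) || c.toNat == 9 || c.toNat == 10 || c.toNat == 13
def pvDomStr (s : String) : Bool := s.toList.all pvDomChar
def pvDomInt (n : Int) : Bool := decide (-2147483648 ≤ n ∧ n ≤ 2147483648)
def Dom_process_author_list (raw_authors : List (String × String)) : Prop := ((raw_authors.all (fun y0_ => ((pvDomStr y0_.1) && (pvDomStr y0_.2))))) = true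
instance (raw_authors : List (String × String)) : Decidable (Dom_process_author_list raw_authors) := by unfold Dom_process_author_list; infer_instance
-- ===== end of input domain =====

-- B replaces A's forward seen-set pass by a reverse traversal that unconditionally
-- overwrites a name↦date dict (last write = first valid occurrence wins), then
-- formats and sorts in a second pass; objective: alternative. Return values proved equal.

-- ===== PORT A =====
-- the module-level set IGNORED_AUTHORS
def IGNORED_AUTHORS : PySem.Set String :=
  PySem.Set.ofList ["PJBot", "github-actions[bot]", "GoobBot", "GoobBot[bot]", "GoobBot [bot]", "TheDen-Bot"]

-- loop body of A: state = (authors_list, seen_authors_set), p = (author_date, author_name)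
def pvStepA (st : List String × PySem.Set String) (p : String × String) :
    List String × PySem.Set String :=
  if PySem.Set.contains st.2 p.2 then st
  else if PySem.Set.contains IGNORED_AUTHORS p.2 then st
  else if p.2 = "" then st
  else if p.1 = "" then st
  else (st.1 ++ [p.1 ++ " " ++ p.2], PySem.Set.add st.2 p.2)

def process_author_list (raw_authors : List (String × String)) : List String :=
  let st := raw_authors.foldl pvStepA ([], PySem.Set.empty)
  PySem.List.sorted st.1 (fun x => x) false

-- ===== PORT B =====
-- B's validity test: 'author_name and author_date and author_name not in IGNORED_AUTHORS'
def pvValid (p : String × String) : Bool :=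
  p.2 != "" && p.1 != "" && !(PySem.Set.contains IGNORED_AUTHORS p.2)

-- loop body of B: unconditional overwrite of latest[author_name] = author_date
def pvStepB (d : PySem.Dict String String) (p : String × String) : PySem.Dict String String :=
  if pvValid p then d.insert p.2 p.1 else d

def process_author_list_alt (raw_authors : List (String × String)) : List String :=
  let latest := raw_authors.reverse.foldl pvStepB PySem.Dict.empty
  PySem.List.sorted (latest.items.map (fun q => q.2 ++ " " ++ q.1)) (fun x => x) false

-- ===== PRECONDITION & SPEC =====
def Spec_process_author_list (raw_authors : List (String × String)) (out : List String) : Prop := out = process_author_list_alt raw_authors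
instance (raw_authors : List (String × String)) (out : List String) : Decidable (Spec_process_author_list raw_authors out) := by unfold Spec_process_author_list; infer_instance

-- ===== CLAIM (what is proved, stated in full; the proofs are below) =====
def Claim_equal_process_author_list : Prop := ∀ (raw_authors : List (String × String)), Dom_process_author_list raw_authors → Spec_process_author_list raw_authors (process_author_list raw_authors)

-- ===== LEMMAS AND PROOFS =====

-- first-wins dict step: a proof-side model of A's loop
def pvStepF (d : PySem.Dict String String) (p : String × String) : PySem.Dict String String :=
  if pvValid p && !(d.contains p.2) then d.insert p.2 p.1 else d

-- the date of the first valid pair with name n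
def pvFirst (l : List (String × String)) (n : String) : Option String :=
  (l.find? (fun p => pvValid p && p.2 == n)).map (·.1)

theorem pvFirst_cons (p : String × String) (t : List (String × String)) (n : String) :
    pvFirst (p :: t) n = if pvValid p && p.2 == n then some p.1 else pvFirst t n := by
  by_cases h : (pvValid p && p.2 == n) = true
  · simp [pvFirst, h]
  · have h' : (pvValid p && p.2 == n) = false := by simpa using h
    simp [pvFirst, h']

-- A's state is the first-wins dict, viewed as (formatted items, keys)
theorem pv_A_dict (raw : List (String × String)) (d : PySem.Dict String String) :
    raw.foldl pvStepA (d.items.map (fun q => q.2 ++ " " ++ q.1), d.keys)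
      = ((raw.foldl pvStepF d).items.map (fun q => q.2 ++ " " ++ q.1),
         (raw.foldl pvStepF d).keys) := by
  induction raw generalizing d with
  | nil => rfl
  | cons p rest ih =>
    simp only [List.foldl_cons]
    have hAB : pvStepA (d.items.map (fun q => q.2 ++ " " ++ q.1), d.keys) p
        = ((pvStepF d p).items.map (fun q => q.2 ++ " " ++ q.1), (pvStepF d p).keys) := by
      unfold pvStepA pvStepF pvValid
      by_cases hmem : p.2 ∈ d.keys
      · have hseen : d.contains p.2 = true := by
          simp [PySem.Dict.contains_eq_decide_mem_keys, hmem]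
        simp [hmem, hseen]
      · have hnc : d.contains p.2 = false := by
          simp [PySem.Dict.contains_eq_decide_mem_keys, hmem]
        by_cases hign : p.2 ∈ IGNORED_AUTHORS
        · simp [hmem, hnc, hign]
        · by_cases hn : p.2 = ""
          · simp [hn]
          · by_cases hd : p.1 = ""
            · simp [hmem, hnc, hign, hn, hd]
            · simp [hmem, hign, hn, hd, hnc, PySem.Set.add,
                PySem.Dict.items_insert_of_not_contains,
                PySem.Dict.keys_insert_of_not_contains]
    rw [hAB, ih]

theorem pv_get_F (l : List (String × String)) (d : PySem.Dict String String) (n : String) :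
    (l.foldl pvStepF d).get? n = (d.get? n).or (pvFirst l n) := by
  induction l generalizing d with
  | nil => simp [pvFirst]
  | cons p t ih =>
    simp only [List.foldl_cons]
    rw [ih, pvFirst_cons]
    by_cases hn : n = p.2
    · subst hn
      by_cases hv : pvValid p = true
      · by_cases hc : d.contains p.2 = true
        · rw [show pvStepF d p = d from by simp [pvStepF, hc]]
          obtain ⟨v, hval⟩ : ∃ v, d.get? p.2 = some v := by
            rcases ho : d.get? p.2 with _ | v
            · rw [PySem.Dict.contains_eq_isSome_get?, ho] at hc; simp at hc
            · exact ⟨v, rfl⟩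
          rw [hval]
          rfl
        · have hnc : d.contains p.2 = false := by simpa using hc
          rw [show pvStepF d p = d.insert p.2 p.1 from by simp [pvStepF, hv, hnc]]
          have hnone : d.get? p.2 = none := by
            rcases ho : d.get? p.2 with _ | v
            · rfl
            · rw [PySem.Dict.contains_eq_isSome_get?, ho] at hnc; simp at hnc
          simp [hnone, hv]
      · have hv' : pvValid p = false := by simpa using hv
        rw [show pvStepF d p = d from by simp [pvStepF, hv']]
        simp [hv']
    · have hne : (p.2 == n) = false := by simp [Ne.symm hn]
      have hget : (pvStepF d p).get? n = d.get? n := by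
        unfold pvStepF
        split
        · simp [PySem.Dict.get?_insert, hn]
        · rfl
      rw [hget, hne]
      simp

theorem pv_get_R (l : List (String × String)) (n : String) :
    (l.foldr (fun p d => pvStepB d p) PySem.Dict.empty).get? n = pvFirst l n := by
  induction l with
  | nil => simp [pvFirst]
  | cons p t ih =>
    simp only [List.foldr_cons]
    rw [pvFirst_cons]
    set D := t.foldr (fun p d => pvStepB d p) PySem.Dict.empty with hD
    by_cases hv : pvValid p = true
    · rw [show pvStepB D p = D.insert p.2 p.1 from by simp [pvStepB, hv]]
      by_cases hn : n = p.2
      · subst hn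
        simp [hv]
      · have hne : (p.2 == n) = false := by simp [Ne.symm hn]
        rw [show (D.insert p.2 p.1).get? n = D.get? n from by simp [PySem.Dict.get?_insert, hn]]
        rw [ih, hne]
        simp
    · have hv' : pvValid p = false := by simpa using hv
      rw [show pvStepB D p = D from by simp [pvStepB, hv']]
      rw [ih, hv']
      simp

theorem pv_nodup_F (l : List (String × String)) (d : PySem.Dict String String)
    (h : d.keys.Nodup) : (l.foldl pvStepF d).keys.Nodup := by
  induction l generalizing d with
  | nil => exact h
  | cons p t ih =>
    simp only [List.foldl_cons]
    apply ih
    unfold pvStepF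
    split
    · exact PySem.Dict.nodup_keys_insert _ _ _ h
    · exact h

theorem pv_nodup_R (l : List (String × String)) :
    (l.foldr (fun p d => pvStepB d p) PySem.Dict.empty).keys.Nodup := by
  induction l with
  | nil => exact PySem.Dict.nodup_keys_empty
  | cons p t ih =>
    simp only [List.foldr_cons]
    unfold pvStepB
    split
    · exact PySem.Dict.nodup_keys_insert _ _ _ ih
    · exact ih

-- ===== VERDICT (by name: the statement is the Claim_ definition above) =====
theorem process_author_list_spec : Claim_equal_process_author_list := by
  intro raw _
  unfold Spec_process_author_list process_author_list process_author_list_alt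
  have hA0 := pv_A_dict raw PySem.Dict.empty
  set Df := raw.foldl pvStepF PySem.Dict.empty with hDf
  set R := raw.foldr (fun p d => pvStepB d p) PySem.Dict.empty with hR
  have hgets : ∀ n, Df.get? n = R.get? n := by
    intro n
    rw [hDf, hR, pv_get_F, pv_get_R, PySem.Dict.get?_empty]
    rfl
  have hndF : Df.keys.Nodup := pv_nodup_F raw PySem.Dict.empty (by simp [PySem.Dict.keys_empty])
  have hndR : R.keys.Nodup := pv_nodup_R raw
  have hkeys : Df.keys.Perm R.keys := by
    rw [List.perm_ext_iff_of_nodup hndF hndR]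
    intro k
    rw [← not_iff_not, ← PySem.Dict.get?_eq_none_iff_not_mem_keys,
        ← PySem.Dict.get?_eq_none_iff_not_mem_keys, hgets k]
  have hitems : Df.items.Perm R.items := by
    rw [PySem.Dict.items_eq_map_keys Df hndF "", PySem.Dict.items_eq_map_keys R hndR ""]
    have hfun : (fun k => (k, Df.getD k "")) = (fun k => (k, R.getD k "")) := by
      funext k
      rw [PySem.Dict.getD_eq_get?_getD, PySem.Dict.getD_eq_get?_getD, hgets k]
    rw [hfun]
    exact hkeys.map _
  have hperm : (Df.items.map (fun q => q.2 ++ " " ++ q.1)).Perm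
      (R.items.map (fun q => q.2 ++ " " ++ q.1)) := hitems.map _
  have h1 : (raw.foldl pvStepA ([], PySem.Set.empty)).1
      = Df.items.map (fun q => q.2 ++ " " ++ q.1) := congrArg Prod.fst hA0
  have hrev : raw.reverse.foldl pvStepB PySem.Dict.empty = R := by
    rw [List.foldl_reverse, hR]
  show PySem.List.sorted (raw.foldl pvStepA ([], PySem.Set.empty)).1 (fun x => x) false
      = PySem.List.sorted ((raw.reverse.foldl pvStepB PySem.Dict.empty).items.map
          (fun q => q.2 ++ " " ++ q.1)) (fun x => x) false
  rw [h1, hrev]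
  exact (PySem.List.sorted_id_eq_sorted_id_iff_perm _ _).mpr hperm
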